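-- pv_equiv track=rewrite | github.com/momocat1102/tetris_project | tetris.py | Judge_Left_move
-- ===== SOURCE A (Python) =====
-- def Judge_Left_move(present_block, present_block_x, present_block_y, initial_map):
--     # 判斷左移
--     next_x = present_block_x - 1
--     for y, line in enumerate(present_block):
--         for x, block in enumerate(line):
--             # 判斷左邊界
--             if block != 0 and next_x + x < 0:
--                 return False
--     # 判斷跟其他方塊有無碰撞
--     if Judge_collision(present_block, next_x, present_block_y, initial_map):
--         return True
--     else:
--         return False
--
-- def Get_Mapblocks_position(initial_map):
--     # 獲取map中有block的位置
--     all_stop_blocks = []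
--     for y, line in enumerate(initial_map):
--         for x, block in enumerate(line):
--             if block != 0:
--                 all_stop_blocks.append((x, y))
--     return all_stop_blocks
--
-- def Judge_collision(present_block, present_block_x, present_block_y, initial_map):
--     # 判斷跟其他方塊的碰撞
--     all_stop_blocks = Get_Mapblocks_position(initial_map)
--     for y, line in enumerate(present_block):
--         for x, block in enumerate(line):
--             if block != 0 and (present_block_x + x, present_block_y + y) in all_stop_blocks:
--                 return False
--     return True
-- ===== SOURCE B (Python) =====
-- def Judge_Left_move(present_block, present_block_x, present_block_y, initial_map):
--     # One pass over the block cells; probe the map directly with bounds checks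
--     # instead of building the full list of occupied map positions.
--     next_x = present_block_x - 1
--     rows = len(initial_map)
--     for y, line in enumerate(present_block):
--         gy = present_block_y + y
--         for x, block in enumerate(line):
--             if block == 0:
--                 continue
--             gx = next_x + x
--             if gx < 0:
--                 return False
--             if 0 <= gy < rows and gx < len(initial_map[gy]) and initial_map[gy][gx] != 0:
--                 return False
--     return True
-- ===== Notes on version B (the rewrite author's own statement) =====
-- stated objective: faster
-- what changed: Instead of building the list of all occupied map positions and scanning it for each block cell, B probes the map cell under each block cell directly with bounds checks, in a single pass over the block.
import Mathlib
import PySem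

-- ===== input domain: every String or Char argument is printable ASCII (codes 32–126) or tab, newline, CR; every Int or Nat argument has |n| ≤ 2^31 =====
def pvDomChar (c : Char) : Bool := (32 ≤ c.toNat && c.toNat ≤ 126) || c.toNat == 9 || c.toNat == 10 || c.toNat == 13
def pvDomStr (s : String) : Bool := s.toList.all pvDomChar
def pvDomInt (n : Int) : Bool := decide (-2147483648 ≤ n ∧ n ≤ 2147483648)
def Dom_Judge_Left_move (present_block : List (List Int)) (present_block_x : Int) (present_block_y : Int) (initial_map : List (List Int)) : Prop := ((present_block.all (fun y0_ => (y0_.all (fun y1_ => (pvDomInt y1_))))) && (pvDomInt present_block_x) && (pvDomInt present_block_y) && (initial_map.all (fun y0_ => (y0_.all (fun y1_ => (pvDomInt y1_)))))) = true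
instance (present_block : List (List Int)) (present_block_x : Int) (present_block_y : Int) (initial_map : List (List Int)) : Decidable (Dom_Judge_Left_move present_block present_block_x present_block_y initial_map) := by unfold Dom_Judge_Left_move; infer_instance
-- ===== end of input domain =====

-- B replaces A's "collect all occupied map positions, then scan that list per block cell"
-- by a single pass over the block that probes the map cell directly with bounds checks (faster).


-- ===== PORT A =====
-- inner loop of Get_Mapblocks_position: append (x, y) for each nonzero cell
def getMapRow (y : Int) (x : Int) : List Int → List (Int × Int)
  | [] => []
  | b :: rest => (if b ≠ 0 then [(x, y)] else []) ++ getMapRow y (x + 1) rest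

def getMapRows (y : Int) : List (List Int) → List (Int × Int)
  | [] => []
  | line :: rest => getMapRow y 0 line ++ getMapRows (y + 1) rest

def Get_Mapblocks_position (initial_map : List (List Int)) : List (Int × Int) :=
  getMapRows 0 initial_map

-- inner loop of Judge_collision: early-return False on a nonzero cell over an occupied position
def collideRow (stops : List (Int × Int)) (px py : Int) (x : Int) : List Int → Bool
  | [] => true
  | b :: rest =>
      if b ≠ 0 ∧ (px + x, py) ∈ stops then false
      else collideRow stops px py (x + 1) rest

def collideRows (stops : List (Int × Int)) (px py : Int) : List (List Int) → Bool
  | [] => true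
  | line :: rest =>
      if collideRow stops px py 0 line then collideRows stops px (py + 1) rest else false

def Judge_collision (present_block : List (List Int)) (present_block_x : Int)
    (present_block_y : Int) (initial_map : List (List Int)) : Bool :=
  let all_stop_blocks := Get_Mapblocks_position initial_map
  collideRows all_stop_blocks present_block_x present_block_y present_block

-- left-boundary loop of Judge_Left_move: early-return False if a nonzero cell crosses x = 0
def leftRow (next_x : Int) (x : Int) : List Int → Bool
  | [] => true
  | b :: rest => if b ≠ 0 ∧ next_x + x < 0 then false else leftRow next_x (x + 1) rest

def leftRows (next_x : Int) : List (List Int) → Bool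
  | [] => true
  | line :: rest => if leftRow next_x 0 line then leftRows next_x rest else false

def Judge_Left_move (present_block : List (List Int)) (present_block_x : Int) (present_block_y : Int) (initial_map : List (List Int)) : Bool :=
  let next_x := present_block_x - 1
  if leftRows next_x present_block then
    if Judge_collision present_block next_x present_block_y initial_map then true else false
  else false

-- ===== PORT B =====
-- is map cell (gx, gy) inside the map and nonzero? (direct bounds-checked probe)
def bOccupied (initial_map : List (List Int)) (gy gx : Int) : Bool :=
  decide (0 ≤ gy) && decide (gy < (initial_map.length : Int)) &&
    (let row := initial_map.getD gy.toNat []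
     decide (gx < (row.length : Int)) && decide (row.getD gx.toNat 0 ≠ 0))

def bCellLoop (initial_map : List (List Int)) (next_x gy : Int) (x : Int) : List Int → Bool
  | [] => true
  | b :: rest =>
      if b = 0 then bCellLoop initial_map next_x gy (x + 1) rest
      else
        let gx := next_x + x
        if gx < 0 then false
        else if bOccupied initial_map gy gx then false
        else bCellLoop initial_map next_x gy (x + 1) rest

def bRowLoop (initial_map : List (List Int)) (next_x py : Int) (y : Int) : List (List Int) → Bool
  | [] => true
  | line :: rest =>
      if bCellLoop initial_map next_x (py + y) 0 line then bRowLoop initial_map next_x py (y + 1) rest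
      else false

def Judge_Left_move_alt (present_block : List (List Int)) (present_block_x : Int) (present_block_y : Int) (initial_map : List (List Int)) : Bool :=
  bRowLoop initial_map (present_block_x - 1) present_block_y 0 present_block

-- ===== PRECONDITION & SPEC =====
def Spec_Judge_Left_move (present_block : List (List Int)) (present_block_x : Int) (present_block_y : Int) (initial_map : List (List Int)) (out : Bool) : Prop := out = Judge_Left_move_alt present_block present_block_x present_block_y initial_map
instance (present_block : List (List Int)) (present_block_x : Int) (present_block_y : Int) (initial_map : List (List Int)) (out : Bool) : Decidable (Spec_Judge_Left_move present_block present_block_x present_block_y initial_map out) := by unfold Spec_Judge_Left_move; infer_instance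

-- ===== CLAIM (what is proved, stated in full; the proofs are below) =====
def Claim_equal_Judge_Left_move : Prop := ∀ (present_block : List (List Int)) (present_block_x : Int) (present_block_y : Int) (initial_map : List (List Int)), Dom_Judge_Left_move present_block present_block_x present_block_y initial_map → Spec_Judge_Left_move present_block present_block_x present_block_y initial_map (Judge_Left_move present_block present_block_x present_block_y initial_map)

-- ===== LEMMAS AND PROOFS =====

-- membership in one generated row
theorem mem_getMapRow (gx gy y x : Int) (row : List Int) :
    (gx, gy) ∈ getMapRow y x row ↔
      gy = y ∧ ∃ j : Nat, ∃ h : j < row.length, row[j] ≠ 0 ∧ gx = x + (j : Int) := by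
  induction row generalizing x with
  | nil => simp [getMapRow]
  | cons b rest ih =>
      simp only [getMapRow, List.mem_append, ih]
      constructor
      · rintro (h | ⟨hy, j, hj, hnz, hx⟩)
        · split_ifs at h with hb
          · simp at h
            exact ⟨h.2, 0, by simp, by simpa using hb, by simpa using h.1⟩
          · simp at h
        · exact ⟨hy, j + 1, by simp only [List.length_cons]; omega, by simpa using hnz, by push_cast; omega⟩
      · rintro ⟨hy, j, hj, hnz, hx⟩
        cases j with
        | zero =>
            left
            have hb : b ≠ 0 := by simpa using hnz
            simp [hb, hy]
            omega
        | succ j =>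
            right
            exact ⟨hy, j, by simp only [List.length_cons] at hj; omega, by simpa using hnz, by push_cast at hx ⊢; omega⟩

theorem mem_getMapRows (gx gy y : Int) (m : List (List Int)) :
    (gx, gy) ∈ getMapRows y m ↔
      ∃ i : Nat, ∃ h : i < m.length, (gx, gy) ∈ getMapRow (y + (i : Int)) 0 m[i] := by
  induction m generalizing y with
  | nil => simp [getMapRows]
  | cons line rest ih =>
      simp only [getMapRows, List.mem_append, ih]
      constructor
      · rintro (h | ⟨i, hi, h⟩)
        · exact ⟨0, by simp, by simpa using h⟩
        · refine ⟨i + 1, by simp only [List.length_cons]; omega, ?_⟩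
          have : y + 1 + (i : Int) = y + ((i : Int) + 1) := by ring
          simpa [this] using h
      · rintro ⟨i, hi, h⟩
        cases i with
        | zero => left; simpa using h
        | succ i =>
            right
            refine ⟨i, by simp only [List.length_cons] at hi; omega, ?_⟩
            have : y + 1 + (i : Int) = y + ((i : Int) + 1) := by ring
            rw [this]
            simpa using h

-- the occupancy probe characterises membership in the stop-block list (for 0 ≤ gx)
theorem mem_stops_iff (m : List (List Int)) (gx gy : Int) (hgx : 0 ≤ gx) :
    (gx, gy) ∈ Get_Mapblocks_position m ↔ bOccupied m gy gx = true := by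
  unfold Get_Mapblocks_position bOccupied
  rw [mem_getMapRows]
  simp only [Bool.and_eq_true, decide_eq_true_eq]
  constructor
  · rintro ⟨i, hi, h⟩
    rw [mem_getMapRow] at h
    obtain ⟨hy, j, hj, hnz, hx⟩ := h
    have hgy : gy = (i : Int) := by omega
    have hiy : gy.toNat = i := by omega
    have hjx : gx.toNat = j := by omega
    refine ⟨⟨by omega, by exact_mod_cast by omega⟩, ?_, ?_⟩
    · rw [hiy, List.getD_eq_getElem _ _ hi]; omega
    · rw [hiy, List.getD_eq_getElem _ _ hi, hjx, List.getD_eq_getElem _ _ hj]; exact hnz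
  · rintro ⟨⟨h0, h1⟩, h2, h3⟩
    have hi : gy.toNat < m.length := by omega
    refine ⟨gy.toNat, hi, ?_⟩
    rw [List.getD_eq_getElem _ _ hi] at h2 h3
    have hj : gx.toNat < m[gy.toNat].length := by omega
    rw [List.getD_eq_getElem _ _ hj] at h3
    rw [mem_getMapRow]
    exact ⟨by omega, gx.toNat, hj, h3, by omega⟩

theorem mem_stops_nonneg (m : List (List Int)) (gx gy : Int)
    (h : (gx, gy) ∈ Get_Mapblocks_position m) : 0 ≤ gx := by
  unfold Get_Mapblocks_position at h
  rw [mem_getMapRows] at h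
  obtain ⟨i, hi, h⟩ := h
  rw [mem_getMapRow] at h
  obtain ⟨_, j, _, _, hx⟩ := h
  omega

-- B's inner loop = A's two inner loops combined
theorem cell_eq (m : List (List Int)) (next_x gy : Int) (row : List Int) (x : Int) :
    bCellLoop m next_x gy x row =
      (leftRow next_x x row && collideRow (Get_Mapblocks_position m) next_x gy x row) := by
  induction row generalizing x with
  | nil => simp [bCellLoop, leftRow, collideRow]
  | cons b rest ih =>
      by_cases hb : b = 0
      · simp [bCellLoop, leftRow, collideRow, hb, ih]
      · by_cases hneg : next_x + x < 0
        · have hmem : ¬ (next_x + x, gy) ∈ Get_Mapblocks_position m := fun h =>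
            absurd (mem_stops_nonneg m _ _ h) (by omega)
          simp [bCellLoop, leftRow, collideRow, hb, hneg, hmem]
        · have hge : (0:Int) ≤ next_x + x := by omega
          by_cases hocc : bOccupied m gy (next_x + x) = true
          · have hmem : (next_x + x, gy) ∈ Get_Mapblocks_position m :=
              (mem_stops_iff m _ _ hge).mpr hocc
            simp [bCellLoop, leftRow, collideRow, hb, hneg, hocc, hmem]
          · have hmem : ¬ (next_x + x, gy) ∈ Get_Mapblocks_position m := fun h =>
              hocc ((mem_stops_iff m _ _ hge).mp h)
            simp [bCellLoop, leftRow, collideRow, hb, hneg, hocc, hmem, ih]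

theorem row_eq (m : List (List Int)) (next_x py : Int) (pb : List (List Int)) (y : Int) :
    bRowLoop m next_x py y pb =
      (leftRows next_x pb && collideRows (Get_Mapblocks_position m) next_x (py + y) pb) := by
  induction pb generalizing y with
  | nil => simp [bRowLoop, leftRows, collideRows]
  | cons line rest ih =>
      simp only [bRowLoop, leftRows, collideRows, cell_eq]
      have hy : py + (y + 1) = py + y + 1 := by ring
      by_cases h1 : leftRow next_x 0 line = true
      · by_cases h2 : collideRow (Get_Mapblocks_position m) next_x (py + y) 0 line = true
        · simp [h1, h2, ih, hy]
        · simp [h1, h2]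
      · simp [h1]

-- ===== VERDICT (by name: the statement is the Claim_ definition above) =====
theorem Judge_Left_move_spec : Claim_equal_Judge_Left_move := by
  intro pb px py m _
  unfold Spec_Judge_Left_move Judge_Left_move Judge_Left_move_alt Judge_collision
  rw [row_eq]
  simp only [add_zero]
  by_cases h1 : leftRows (px - 1) pb = true
  · by_cases h2 : collideRows (Get_Mapblocks_position m) (px - 1) py pb = true
    · simp [h1, h2]
    · simp [h1, h2]
  · simp [h1]
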